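/-
  THE SEGMENTS OF `DGifGetRecordType` (dgif_lib.c:325-359; 72 instructions; a PROTECTED frame: the byte `Buf`): the assertions at
  its cut points, the segment claims, and the COMPOSITION (segments ⇒ `DGifGetRecordType.spec`), proved here. The template is
  `DGifGetWord` (Gif/Spec/ReaderSegs.lean).

      unit                      addresses                                  instructions   calls
      DGifGetRecordType.P       108B80H … 108BC9H                          14             —
      DGifGetRecordType.1       108BC9H … 108BF5H, 108C0EH … 108C3EH       23             InternalRead; the checks load8, load4, store4
      DGifGetRecordType.2       108C3EH … 108CB8H                          27             the check store4 (five sites)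
      DGifGetRecordType.E       108BF5H … 108C0EH                           8             —

  THE FRAME: four pushes (`r13 r12 rbp rbx`), `sub rsp, 72`: `rsp = RA − 104` (`RA` = the entry's `rsp`, where the return address
  is); the protected frame's base is `RA − 104` (= the body's `rsp`), 64 bytes; its object `Buf` is the byte at `RA − 72`
  (`[rsp + 20H]`). The registers of the body: `rbp = gif`, `r13 = Type`, `r12` = the shadow index `(RA − 104) >> 3`; `rbx` is a
  scratch register (the private object, then THE RESULT: the epilogue does `mov eax, ebx`); `r14 r15` are never touched.

  THE CONTRACT was checked against the code: nothing to change. (`Type` is only stored through — after `Buf` has been read —, so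
  `BufOK` of the four bytes is all the function needs of it; `type_above` below is derived from it.)
-/
import Gif.Spec.Reader
import Gif.LabelsAt
namespace Gif.Spec
open X86 X86.User Asan ProgX.Base ProgX.Base.Spec

namespace DGifGetRecordType

/-- The active frames inside the body: the function's own protected frame (`base = RA − 104`), innermost. -/
abbrev framesIn (frames : List (Nat × FrameLayout)) (e : State) : List (Nat × FrameLayout) :=
  ((e.reg .rsp).toNat - 104, Gif.Frames.DGifGetRecordType) :: frames

/-- **IN THE BODY of `DGifGetRecordType`**, at the address `cut`, inside the call that was entered at the state `e` (return address
`ret`) with the function's precondition. The prologue is done. -/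
structure Body (cut : Word) (H : Heap) (rest : List Obj) (frames : List (Nat × FrameLayout)) (F : Forest) (R : Rd) (u₀ e : State)
    (ret : Word) (v : State) : Prop where
  /-- the function was entered at `e` … -/
  entry : AtEntry (conv u₀) Gif.L.DGifGetRecordType.entry (DGifGetRecordType.spec H rest frames F R).frame ret e
  /-- … with its precondition -/
  pre : (DGifGetRecordType.spec H rest frames F R).pre e
  /-- `*Type` (4 bytes of a live object at or above 700000H: a stack object of a caller, or a heap object) lies above the
  return-address slot: a store through `Type` meets neither the function's own stack nor the return address. (A consequence of
  `entry` and `pre`: stated once, so that no later segment derives it again.) -/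
  type_above : (e.reg .rsp).toNat + 8 ≤ (e.reg .rsi).toNat
  rip : v.rip = cut
  /-- four pushes and `sub rsp, 72` -/
  rsp : v.reg .rsp = e.reg .rsp - 104
  /-- `mov rbp, rdi`: gif -/
  rbp : v.reg .rbp = e.reg .rdi
  /-- `mov r13, rsi`: Type -/
  r13 : v.reg .r13 = e.reg .rsi
  /-- `mov r12, rsp ; shr r12, 3`: the shadow index of the frame -/
  r12 : v.reg .r12 = (e.reg .rsp - 104) >>> 3
  /-- never touched -/
  r14 : v.reg .r14 = e.reg .r14
  r15 : v.reg .r15 = e.reg .r15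
  /-- the saved registers, in push order (`r13 r12 rbp rbx`) -/
  slot_r13 : v.mem.readLE (e.reg .rsp - 8) 8 = (e.reg .r13).toNat
  slot_r12 : v.mem.readLE (e.reg .rsp - 16) 8 = (e.reg .r12).toNat
  slot_rbp : v.mem.readLE (e.reg .rsp - 24) 8 = (e.reg .rbp).toNat
  slot_rbx : v.mem.readLE (e.reg .rsp - 32) 8 = (e.reg .rbx).toNat
  /-- the return address is still in its slot (`ret` at 108C0DH pops it): no store of the body reaches `[RA, RA + 8)` — the
  stack windows end at `RA`, `*Type` lies above (`type_above`), `gif.Error` is a heap field, the cursor a stack object of a caller -/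
  slot_ra : UInt64.ofNat (v.mem.readLE (e.reg .rsp) 8) = ret
  /-- the heap's invariant, with the function's OWN frame pushed; the clean stack ends at the body's `rsp` -/
  inv : HeapInv H rest (framesIn frames e) ((e.reg .rsp).toNat - 104) v.mem
  /-- the state invariant -/
  ok : GifOK H F R v.mem
  /-- the reader did not go back -/
  rem : rem R v.mem ≤ rem R e.mem
  /-- nothing was written but the function's stack, the 8 shadow bytes of its frame, and the contract's windows -/
  same : Mem.SameExcept
    [⟨(e.reg .rsp).toNat - 288, (e.reg .rsp).toNat⟩,
     shadowSpan ((e.reg .rsp).toNat - 104) ((e.reg .rsp).toNat - 40),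
     ⟨(e.reg .rsi).toNat, (e.reg .rsi).toNat + 4⟩,
     ⟨F.gif + 96, F.gif + 100⟩,
     ⟨R.cur, R.cur + 8⟩] e.mem v.mem
  code : (conv u₀).code.In v.mem
  abi : (conv u₀).inv v

/-- **AFTER THE PROLOGUE** (at 108BC9H, `lea rdi, [rdi + 70H]`, l.327): `Body`, and `rdi` still holds gif (the first instruction
of the body reads it). -/
structure Start (H : Heap) (rest : List Obj) (frames : List (Nat × FrameLayout)) (F : Forest) (R : Rd) (u₀ e : State)
    (ret : Word) (v : State) : Prop where
  body : Body Gif.L.DGifGetRecordType.at_108bc9 H rest frames F R u₀ e ret v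
  /-- the prologue did not change `rdi` -/
  rdi : v.reg .rdi = e.reg .rdi
  /-- the prologue did not move the reader: EXACTLY (the posts count the bytes consumed from the entry; `Body.rem` alone, an
  inequality, would not give `rem + 1 = rem₀` after the first read) -/
  rem_eq : rem R v.mem = rem R e.mem

/-- **AFTER THE SUCCESSFUL READ** (at 108C3EH, `movzx eax, BYTE PTR [rsp + 20H]`, l.342): `InternalRead(gif, &Buf, 1)` returned 1:
`rbx = 1` (`mov ebx, eax`: the result of the three GIF_OK arms), and the reader advanced by exactly one byte. The value of `Buf`
(the byte at `RA − 72`) is ANYTHING: no clause about it. -/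
structure AfterRead (H : Heap) (rest : List Obj) (frames : List (Nat × FrameLayout)) (F : Forest) (R : Rd) (u₀ e : State)
    (ret : Word) (v : State) : Prop where
  body : Body Gif.L.DGifGetRecordType.at_108c3e H rest frames F R u₀ e ret v
  /-- `mov ebx, eax` with `eax = 1` -/
  rbx : (v.reg .rbx).toNat = 1
  /-- `ReadPost` with `k = n = 1` -/
  rem_eq : rem R v.mem + 1 = rem R e.mem

/-- **BEFORE THE EPILOGUE** (at 108BF5H, the store that clears the frame's shadow): `Body`, THE RESULT IN `rbx` (zero-extended: it
comes from `and ebx, 8`, `mov ebx, eax`, `mov ebx, 0`), and the contract's postcondition stated of the present memory (the epilogue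
clears 8 shadow bytes and pops: neither changes what these clauses read). -/
structure Done (H : Heap) (rest : List Obj) (frames : List (Nat × FrameLayout)) (F : Forest) (R : Rd) (u₀ e : State)
    (ret : Word) (v : State) : Prop where
  body : Body Gif.L.DGifGetRecordType.at_108bf5 H rest frames F R u₀ e ret v
  /-- GIF_OK (1) or GIF_ERROR (0), in `rbx` -/
  res : (v.reg .rbx).toNat = 1 ∨ (v.reg .rbx).toNat = 0
  /-- GIF_OK: `*Type` is IMAGE_DESC (2), EXTENSION (3) or TERMINATE (4), and exactly one byte was consumed -/
  ok1 : (v.reg .rbx).toNat = 1 →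
    (rd v.mem (e.reg .rsi).toNat 4 = 2 ∨ rd v.mem (e.reg .rsi).toNat 4 = 3 ∨ rd v.mem (e.reg .rsi).toNat 4 = 4) ∧
    rem R v.mem + 1 = rem R e.mem

/-- **Segment P** (the prologue, 108B80H … 108BC9H, 14 instructions): four pushes, `sub rsp, 72`, the two argument moves, the
frame's three header words, the shadow index, the two poison stores. -/
def SegP (Lay : Layout) (μ : Microarch) (u₀ : State) : Prop :=
  ∀ (H : Heap) (rest : List Obj) (frames : List (Nat × FrameLayout)) (F : Forest) (R : Rd) (e : State) (ret : Word),
    AtEntry (conv u₀) Gif.L.DGifGetRecordType.entry (DGifGetRecordType.spec H rest frames F R).frame ret e →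
    (DGifGetRecordType.spec H rest frames F R).pre e →
    ReachVia Lay μ WayInv e (Start H rest frames F R u₀ e ret)

/-- **Segment 1** (108BC9H … 108BF5H and 108C0EH … 108C3EH, 23 instructions; l.327-338): the checked loads of `gif.Private` and
`pv.FileState`; `FileState & 8 = 0` (dead by `Shape.state`, or walked: l.331, the checked store of `gif.Error`, `ebx = 0`): `Done`;
else `InternalRead(gif, &Buf, 1)` into the frame's object `Buf` (`BufOK`: `LiveIn` through the own frame's object, `Loose.stack`
below the cursor, `HeapWin.offHeap`); not 1: l.337, the checked store of `gif.Error`, `ebx = 0`: `Done`; 1: `AfterRead`. -/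
def Seg1 (Lay : Layout) (μ : Microarch) (u₀ : State) : Prop :=
  ∀ (H : Heap) (rest : List Obj) (frames : List (Nat × FrameLayout)) (F : Forest) (R : Rd) (e : State) (ret : Word) (v : State),
    Start H rest frames F R u₀ e ret v →
    ReachVia Lay μ WayInv v (fun w => Done H rest frames F R u₀ e ret w ∨ AfterRead H rest frames F R u₀ e ret w)

/-- **Segment 2** (108C3EH … 108CB8H, 27 instructions; l.342-358): the `switch (Buf)`: 2CH, 21H, 3BH: the checked store of `*Type`
= 2, 3, 4, `ebx` stays 1; anything else: the checked stores of `*Type = 0` and `gif.Error`, `ebx = 0`. All to `Done`. -/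
def Seg2 (Lay : Layout) (μ : Microarch) (u₀ : State) : Prop :=
  ∀ (H : Heap) (rest : List Obj) (frames : List (Nat × FrameLayout)) (F : Forest) (R : Rd) (e : State) (ret : Word) (v : State),
    AfterRead H rest frames F R u₀ e ret v →
    ReachVia Lay μ WayInv v (Done H rest frames F R u₀ e ret)

/-- **Segment E** (the epilogue, 108BF5H … 108C0EH, 8 instructions): the 8-byte store that clears the frame's shadow,
`mov eax, ebx`, `add rsp, 72`, four pops, `ret`. -/
def SegE (Lay : Layout) (μ : Microarch) (u₀ : State) : Prop :=
  ∀ (H : Heap) (rest : List Obj) (frames : List (Nat × FrameLayout)) (F : Forest) (R : Rd) (e : State) (ret : Word) (v : State),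
    Done H rest frames F R u₀ e ret v →
    ReachVia Lay μ WayInv v (Returned (conv u₀) (DGifGetRecordType.spec H rest frames F R) e ret)

/-- **The composition of `DGifGetRecordType`**: P, then 1, which ends before the epilogue or goes on with 2; then E. -/
theorem compose {Lay : Layout} {μ : Microarch} {u₀ : State} (hP : SegP Lay μ u₀) (h1 : Seg1 Lay μ u₀) (h2 : Seg2 Lay μ u₀)
    (hE : SegE Lay μ u₀) :
    ∀ (H : Heap) (rest : List Obj) (frames : List (Nat × FrameLayout)) (F : Forest) (R : Rd),
      Calls Lay μ WayInv (conv u₀) Gif.L.DGifGetRecordType.entry (DGifGetRecordType.spec H rest frames F R) := by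
  intro H rest frames F R e ret he hp
  refine (hP H rest frames F R e ret he hp).trans ?_
  intro v hv
  refine (h1 H rest frames F R e ret v hv).trans ?_
  intro w hw
  rcases hw with hdone | hread
  · exact hE H rest frames F R e ret w hdone
  · refine (h2 H rest frames F R e ret w hread).trans ?_
    intro x hx
    exact hE H rest frames F R e ret x hx

end DGifGetRecordType

end Gif.Spec
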